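-- pv_equiv track=rewrite | github.com/torreslucs23/Genetic_algorith_nurse_schedule_problem | restritions.py | restrition1
-- ===== SOURCE A (Python) =====
-- def restrition1(m):
--     fit = 0
--
--     for n_shift in range(len(m[0])):
--         cont = 0
--
--         for nurse in m:
--             if nurse[n_shift] == 1:
--                 cont+=1
--         if cont < 1:
--             fit -= 1
--         elif cont > 3:
--             fit -= 1
--     return fit*-1
-- ===== SOURCE B (Python) =====
-- def restrition1(m):
--     counts = [0] * len(m[0])
--     for nurse in m:
--         counts = [c + 1 if x == 1 else c for c, x in zip(counts, nurse)]
--     return sum(1 for c in counts if c < 1 or c > 3)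
-- ===== Notes on version B (the rewrite author's own statement) =====
-- stated objective: simpler
-- what changed: Replaces the column-major nested rescans (one pass over all nurses per shift) with a single row-major pass that keeps a per-shift counts table updated by zipping, then one scan of the table; no indexing at all.
import Mathlib
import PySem

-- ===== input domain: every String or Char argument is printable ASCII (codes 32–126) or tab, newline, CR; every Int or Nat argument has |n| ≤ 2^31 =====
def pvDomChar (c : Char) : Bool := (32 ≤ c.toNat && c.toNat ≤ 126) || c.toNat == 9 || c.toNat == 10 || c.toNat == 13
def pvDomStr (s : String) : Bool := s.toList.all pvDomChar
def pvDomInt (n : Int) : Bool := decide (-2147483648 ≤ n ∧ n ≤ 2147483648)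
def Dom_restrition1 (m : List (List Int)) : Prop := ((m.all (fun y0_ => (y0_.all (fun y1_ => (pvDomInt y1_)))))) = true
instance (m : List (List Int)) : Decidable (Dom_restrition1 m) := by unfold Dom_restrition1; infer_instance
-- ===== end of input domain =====

-- B replaces A's column-major nested rescans by one row-major pass maintaining a
-- per-shift counts table (via zip, no indexing) plus one scan of the table; same cost, simpler.

-- ===== PORT A =====
def restrition1 (m : List (List Int)) : Int :=
  let fit : Int :=
    (PySem.List.pyRange 0 ((PySem.List.pyGetD m 0 []).length : Int) 1).foldl
      (fun fit n_shift =>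
        let cont : Int := m.foldl
          (fun cont nurse =>
            if PySem.List.pyGetD nurse n_shift 0 = 1 then cont + 1 else cont) 0
        if cont < 1 then fit - 1
        else if cont > 3 then fit - 1
        else fit) 0
  fit * -1

-- ===== PORT B =====
def restrition1_alt (m : List (List Int)) : Int :=
  let counts : List Int := m.foldl
    (fun counts nurse =>
      (counts.zip nurse).map (fun p => if p.2 = 1 then p.1 + 1 else p.1))
    (List.replicate (PySem.List.pyGetD m 0 []).length (0 : Int))
  counts.foldl (fun acc c => if c < 1 ∨ c > 3 then acc + 1 else acc) 0

-- ===== PRECONDITION & SPEC =====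
-- Pre_ excludes exactly the inputs on which the Python A raises IndexError:
-- the empty matrix (m[0]) and matrices with a row shorter than the first row.
def Pre_restrition1 (m : List (List Int)) : Prop :=
  m ≠ [] ∧ ∀ nu ∈ m, (m.headI).length ≤ nu.length
instance (m : List (List Int)) : Decidable (Pre_restrition1 m) := by
  unfold Pre_restrition1; infer_instance
def pvWitness_restrition1 : List (List Int) := [[1, 0], [1, 1]]

def Spec_restrition1 (m : List (List Int)) (out : Int) : Prop := out = restrition1_alt m
instance (m : List (List Int)) (out : Int) : Decidable (Spec_restrition1 m out) := by
  unfold Spec_restrition1; infer_instance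

-- ===== CLAIM (what is proved, stated in full; the proofs are below) =====
def Claim_equal_restrition1 : Prop :=
  ∀ (m : List (List Int)), Dom_restrition1 m → Pre_restrition1 m →
    Spec_restrition1 m (restrition1 m)

-- ===== LEMMAS AND PROOFS =====

/-- Per-shift tally of nurses assigned (the value both programs compute per column). -/
def pvCnt (ns : List (List Int)) (s : Nat) : Int :=
  (ns.map (fun nu => if nu.getD s 0 = 1 then (1 : Int) else 0)).sum

theorem pvCnt_cons (nu : List Int) (ns : List (List Int)) (s : Nat) :
    pvCnt (nu :: ns) s = (if nu.getD s 0 = 1 then (1 : Int) else 0) + pvCnt ns s := by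
  simp [pvCnt]

/-- A counting foldl is the start value plus a 0/1 sum. -/
theorem pvFoldlCount {α : Type} (p : α → Prop) [DecidablePred p] (l : List α) (a : Int) :
    l.foldl (fun acc x => if p x then acc + 1 else acc) a
      = a + (l.map (fun x => if p x then (1 : Int) else 0)).sum := by
  induction l generalizing a with
  | nil => simp
  | cons x xs ih =>
    simp only [List.foldl_cons, List.map_cons, List.sum_cons, ih]
    split_ifs <;> ring

/-- A's outer loop subtracts one per bad column. -/
theorem pvFoldlA (contf : Int → Int) (l : List Int) (a : Int) :
    l.foldl (fun fit i =>
        if contf i < 1 then fit - 1 else if contf i > 3 then fit - 1 else fit) a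
      = a - (l.map (fun i => if contf i < 1 ∨ contf i > 3 then (1 : Int) else 0)).sum := by
  induction l generalizing a with
  | nil => simp
  | cons x xs ih =>
    simp only [List.foldl_cons, List.map_cons, List.sum_cons, ih]
    split_ifs with h1 h2 h3 h4 h5 <;> omega

/-- One nurse updates the counts table pointwise. -/
theorem pvZipStep (k : Nat) (g : Nat → Int) (nu : List Int) (h : k ≤ nu.length) :
    (((List.range k).map g).zip nu).map (fun p => if p.2 = 1 then p.1 + 1 else p.1)
      = (List.range k).map (fun s => if nu.getD s 0 = 1 then g s + 1 else g s) := by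
  apply List.ext_getElem
  · simp [Nat.min_eq_left h]
  · intro i hi _
    have hik : i < k := by simpa [Nat.min_eq_left h] using hi
    have hin : i < nu.length := lt_of_lt_of_le hik h
    simp [List.getElem_zip, List.getD_eq_getElem?_getD, List.getElem?_eq_getElem hin]

/-- Invariant of B's row-major pass: the counts table holds the per-shift tallies. -/
theorem pvFoldB (ns : List (List Int)) (k : Nat) (g : Nat → Int)
    (h : ∀ nu ∈ ns, k ≤ nu.length) :
    ns.foldl
        (fun counts nurse =>
          (counts.zip nurse).map (fun p => if p.2 = 1 then p.1 + 1 else p.1))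
        ((List.range k).map g)
      = (List.range k).map (fun s => g s + pvCnt ns s) := by
  induction ns generalizing g with
  | nil => simp [pvCnt]
  | cons nu ns ih =>
    simp only [List.foldl_cons]
    rw [pvZipStep k g nu (h nu (by simp))]
    rw [ih (fun s => if nu.getD s 0 = 1 then g s + 1 else g s)
        (fun x hx => h x (by simp [hx]))]
    apply List.map_congr_left
    intro s _
    rw [pvCnt_cons]
    split_ifs with hc <;> ring

theorem restrition1_eq (m : List (List Int)) (hpre : Pre_restrition1 m) :
    restrition1 m = restrition1_alt m := by
  obtain ⟨hne, hrows⟩ := hpre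
  set k : Nat := (PySem.List.pyGetD m 0 []).length with hk
  have hkrow : ∀ nu ∈ m, k ≤ nu.length := by
    intro nu hnu
    have hhead : PySem.List.pyGetD m 0 [] = m.headI := by
      cases m with
      | nil => exact absurd rfl hne
      | cons a l => simp [PySem.List.pyGetD_zero_cons, List.headI]
    rw [hk, hhead]
    exact hrows nu hnu
  have hcontI : ∀ i : Int, 0 ≤ i →
      m.foldl (fun cont nurse =>
        if PySem.List.pyGetD nurse i 0 = 1 then cont + 1 else cont) 0
        = pvCnt m i.toNat := by
    intro i hi
    rw [pvFoldlCount (fun nu : List Int => PySem.List.pyGetD nu i 0 = 1) m 0]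
    have hget : ∀ nu : List Int, PySem.List.pyGetD nu i 0 = nu.getD i.toNat 0 := by
      intro nu
      have : i = ((i.toNat : Nat) : Int) := by omega
      rw [this, PySem.List.pyGetD_natCast]
      congr 1
    simp only [pvCnt, hget, zero_add]
  have hA : restrition1 m
      = ((List.range k).map
          (fun s => if pvCnt m s < 1 ∨ pvCnt m s > 3 then (1 : Int) else 0)).sum := by
    simp only [restrition1, ← hk]
    rw [PySem.List.pyRange_one,
      pvFoldlA (fun i => m.foldl (fun cont nurse =>
        if PySem.List.pyGetD nurse i 0 = 1 then cont + 1 else cont) 0),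
      List.map_map]
    have hk0 : ((k : Int) - 0).toNat = k := by omega
    rw [hk0]
    have hlin : ∀ X Y : Int, X = Y → (0 - X) * -1 = Y := by intro X Y h; omega
    apply hlin
    congr 1
    apply List.map_congr_left
    intro s _
    simp only [Function.comp_apply, zero_add]
    rw [hcontI (s : Int) (by positivity)]
    simp
  have hB : restrition1_alt m
      = ((List.range k).map
          (fun s => if pvCnt m s < 1 ∨ pvCnt m s > 3 then (1 : Int) else 0)).sum := by
    simp only [restrition1_alt, ← hk]
    have hrepl : List.replicate k (0 : Int) = (List.range k).map (fun _ => (0 : Int)) := by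
      simp
    rw [hrepl, pvFoldB m k (fun _ => (0 : Int)) hkrow,
      pvFoldlCount (fun c : Int => c < 1 ∨ c > 3), List.map_map]
    simp [Function.comp_def]
  rw [hA, hB]

-- ===== VERDICT (by name: the statement is the Claim_ definition above) =====
theorem restrition1_spec : Claim_equal_restrition1 := by
  intro m _ hpre
  unfold Spec_restrition1
  exact restrition1_eq m hpre
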